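-- pv_equiv track=rewrite | github.com/Anusi-Patel/Information_Security | Playfair_Modified.py | create_matrices
-- ===== SOURCE A (Python) =====
-- def create_matrices(key):
--     def create_matrix(key):
--         matrix = []
--         alphabet = "ABCDEFGHIKLMNOPQRSTUVWXYZ"
--
--         for char in key:
--             if char not in matrix and char in alphabet:
--                 matrix.append(char)
--
--         for char in alphabet:
--             if char not in matrix:
--                 matrix.append(char)
--
--         return [matrix[i:i + 5] for i in range(0, 25, 5)]
--
--     # Split the key into two parts
--     if len(key) % 2 == 1:
--         mid = len(key) // 2 + 1
--     else:
--         mid = len(key) // 2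
--     key1 = key[:mid]
--     key2 = key[mid:]
--
--     matrix1 = create_matrix(key1)
--     matrix2 = create_matrix(key2)
--     return matrix1, matrix2
-- ===== SOURCE B (Python) =====
-- def create_matrices(key):
--     alphabet = "ABCDEFGHIKLMNOPQRSTUVWXYZ"
--
--     def rank(k, c):
--         i = k.find(c)
--         return i if i >= 0 else len(k) + alphabet.find(c)
--
--     def create_matrix(k):
--         ordered = sorted(alphabet, key=lambda c: rank(k, c))
--         return [ordered[i:i + 5] for i in range(0, 25, 5)]
--
--     mid = (len(key) + 1) // 2
--     return create_matrix(key[:mid]), create_matrix(key[mid:])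
-- ===== Notes on version B (the rewrite author's own statement) =====
-- stated objective: faster
-- what changed: Instead of A's two guarded append loops (scan the key appending unseen alphabet letters with a list-membership test per character, then scan the alphabet appending the rest), B sorts the fixed 25-letter alphabet by a rank key — first-occurrence index in the key half via str.find if present, else key length plus alphabet position — and chunks the sorted list into rows; the key split uses the closed form mid=(len+1)//2 instead of the parity branch.
import Mathlib
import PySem

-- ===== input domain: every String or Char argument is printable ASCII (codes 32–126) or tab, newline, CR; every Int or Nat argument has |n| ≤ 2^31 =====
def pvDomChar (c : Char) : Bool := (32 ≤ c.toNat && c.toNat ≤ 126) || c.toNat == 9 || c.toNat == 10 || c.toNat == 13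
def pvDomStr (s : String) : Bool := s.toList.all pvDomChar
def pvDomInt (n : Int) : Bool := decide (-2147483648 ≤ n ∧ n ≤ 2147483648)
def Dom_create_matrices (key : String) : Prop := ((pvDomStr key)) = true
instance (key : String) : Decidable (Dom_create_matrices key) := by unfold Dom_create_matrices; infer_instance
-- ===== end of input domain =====

-- B replaces A's two guarded append-loops by sorting the fixed 25-letter alphabet under a rank
-- key (first-occurrence index in the key half, else key length + alphabet position); same values.


-- ===== PORT A =====
-- Python 1-character strings are carried as Char and turned into 1-character Strings when the
-- rows are built; this shared helper is the identical last line of both Pythons: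
-- [m[i:i+5] for i in range(0, 25, 5)]
def pvChunk5 (m : List Char) : List (List String) :=
  (PySem.List.pyRange 0 25 5).map (fun i =>
    (PySem.List.slice m (some i) (some (i + 5))).map (fun c => String.ofList [c]))

def pvAlphabet : List Char := "ABCDEFGHIKLMNOPQRSTUVWXYZ".toList

def pvCreateMatrixA (k : List Char) : List (List String) :=
  -- for char in key: if char not in matrix and char in alphabet: matrix.append(char)
  let m1 := k.foldl (fun matrix char =>
    if !matrix.contains char && pvAlphabet.contains char then matrix ++ [char] else matrix) []
  -- for char in alphabet: if char not in matrix: matrix.append(char)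
  let m2 := pvAlphabet.foldl (fun matrix char =>
    if !matrix.contains char then matrix ++ [char] else matrix) m1
  pvChunk5 m2

def create_matrices (key : String) : List (List String) × List (List String) :=
  let ks := key.toList
  -- len(key) ≥ 0, so Nat division equals Python's //
  let mid : Nat := if ks.length % 2 = 1 then ks.length / 2 + 1 else ks.length / 2
  let key1 := PySem.List.slice ks none (some (mid : Int))
  let key2 := PySem.List.slice ks (some (mid : Int)) none
  (pvCreateMatrixA key1, pvCreateMatrixA key2)

-- ===== PORT B =====
-- rank(k, c): i = k.find(c); return i if i >= 0 else len(k) + alphabet.find(c)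
def pvRank (k : List Char) (c : Char) : Int :=
  let i := PySem.Chars.find k [c]
  if 0 ≤ i then i else (k.length : Int) + PySem.Chars.find pvAlphabet [c]

def pvCreateMatrixB (k : List Char) : List (List String) :=
  -- ordered = sorted(alphabet, key=lambda c: rank(k, c))
  let ordered := PySem.List.sorted pvAlphabet (fun c => pvRank k c) false
  pvChunk5 ordered

def create_matrices_alt (key : String) : List (List String) × List (List String) :=
  let ks := key.toList
  let mid : Nat := (ks.length + 1) / 2
  (pvCreateMatrixB (PySem.List.slice ks none (some (mid : Int))),
   pvCreateMatrixB (PySem.List.slice ks (some (mid : Int)) none))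

-- ===== PRECONDITION & SPEC =====
def Spec_create_matrices (key : String) (out : List (List String) × List (List String)) : Prop := out = create_matrices_alt key
instance (key : String) (out : List (List String) × List (List String)) : Decidable (Spec_create_matrices key out) := by unfold Spec_create_matrices; infer_instance

-- ===== CLAIM (what is proved, stated in full; the proofs are below) =====
def Claim_equal_create_matrices : Prop := ∀ (key : String), Dom_create_matrices key → Spec_create_matrices key (create_matrices key)

-- ===== LEMMAS AND PROOFS =====

-- str.find with a single-character needle is the first index of that character (-1 if absent)
lemma pvFindGoSingle (c : Char) (s : List Char) (n : Nat) :
    PySem.Chars.find.go [c] s n =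
      if c ∈ s then ((n + List.idxOf c s : Nat) : Int) else -1 := by
  induction s generalizing n with
  | nil => simp [PySem.Chars.find.go]
  | cons x t ih =>
    simp only [PySem.Chars.find.go, List.isPrefixOf]
    by_cases h : c = x
    · subst h; simp
    · have hbeq : (c == x) = false := by simp [h]
      simp only [hbeq, Bool.false_and]
      rw [if_neg (by simp), ih]
      by_cases hm : c ∈ t
      · simp [hm, h, Ne.symm h]
        omega
      · simp [hm, h]

lemma pvFindSingle (c : Char) (s : List Char) :
    PySem.Chars.find s [c] = if c ∈ s then ((List.idxOf c s : Nat) : Int) else -1 := by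
  have := pvFindGoSingle c s 0
  simpa [PySem.Chars.find] using this

-- folding Set.add appends exactly the deduplicated new elements
lemma pvFoldlAddEq (xs : List Char) : ∀ (s : List Char),
    xs.foldl PySem.Set.add s = s ++ (PySem.List.dedup xs).filter (fun a => !s.contains a) := by
  induction xs with
  | nil => intro s; simp
  | cons y ys ih =>
    intro s
    have hded : PySem.List.dedup (y :: ys) = (y :: ys).foldl PySem.Set.add [] := by
      simp [PySem.List.dedup_eq_ofList, PySem.Set.ofList_eq_foldl]
    rw [List.foldl_cons, ih (PySem.Set.add s y), hded, List.foldl_cons, ih (PySem.Set.add [] y)]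
    by_cases hy : y ∈ s
    · have h1 : PySem.Set.add s y = s := by simp [PySem.Set.add, hy]
      have h2 : PySem.Set.add ([] : List Char) y = [y] := by simp [PySem.Set.add]
      rw [h1, h2]
      congr 1
      rw [List.filter_append]
      have : ([y].filter (fun a => !s.contains a)) = [] := by simp [hy]
      rw [this, List.nil_append, List.filter_filter]
      apply List.filter_congr
      intro a _
      by_cases has : a ∈ s
      · simp [has]
      · simp [has]
        exact fun h => absurd (h ▸ hy) has
    · have h1 : PySem.Set.add s y = s ++ [y] := by simp [PySem.Set.add, hy]
      have h2 : PySem.Set.add ([] : List Char) y = [y] := by simp [PySem.Set.add]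
      rw [h1, h2, List.filter_append]
      have h3 : ([y].filter (fun a => !s.contains a)) = [y] := by simp [hy]
      rw [h3, List.filter_filter, List.append_assoc]
      congr 2
      apply List.filter_congr
      intro a _
      by_cases hay : a ∈ ([y] : List Char) <;> by_cases has : a ∈ s <;>
        simp_all [List.mem_append]

-- dedup through a cons: the head, then the tail's dedup with the head removed
lemma pvDedupCons (x : Char) (xs : List Char) :
    PySem.List.dedup (x :: xs) = x :: (PySem.List.dedup xs).filter (fun a => a != x) := by
  have h : PySem.List.dedup (x :: xs) = (x :: xs).foldl PySem.Set.add [] := by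
    simp [PySem.List.dedup_eq_ofList, PySem.Set.ofList_eq_foldl]
  have h2 : PySem.Set.add ([] : List Char) x = [x] := by simp [PySem.Set.add]
  rw [h, List.foldl_cons, h2, pvFoldlAddEq]
  simp only [List.singleton_append, List.cons.injEq, true_and]
  apply List.filter_congr
  intro a _
  by_cases hax : a = x <;> simp [hax]

-- elements of dedup appear in order of first occurrence
lemma pvDedupPairwise (xs : List Char) :
    (PySem.List.dedup xs).Pairwise (fun a b => List.idxOf a xs < List.idxOf b xs) := by
  induction xs with
  | nil => simp
  | cons x t ih =>
    rw [pvDedupCons]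
    constructor
    · intro b hb
      have hbx : b ≠ x := by simpa using (List.mem_filter.mp hb).2
      simp [Ne.symm hbx]
    · have hpw := List.Pairwise.sublist
        (List.filter_sublist (l := PySem.List.dedup t) (p := fun a => a != x)) ih
      apply List.Pairwise.imp_of_mem ?_ hpw
      intro a b ha hb hab
      have hax : a ≠ x := by simpa using (List.mem_filter.mp ha).2
      have hbx : b ≠ x := by simpa using (List.mem_filter.mp hb).2
      simp [Ne.symm hax, Ne.symm hbx]
      omega

-- filtering preserves the relative order of first occurrences
lemma pvFilterIdxOfMono (p : Char → Bool) (xs : List Char) (a b : Char)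
    (ha : a ∈ xs.filter p) (hb : b ∈ xs.filter p)
    (h : List.idxOf a (xs.filter p) < List.idxOf b (xs.filter p)) :
    List.idxOf a xs < List.idxOf b xs := by
  induction xs with
  | nil => simp at ha
  | cons x t ih =>
    by_cases hp : p x
    · rw [List.filter_cons_of_pos hp] at ha hb h
      by_cases hax : a = x
      · subst hax
        have hba : b ≠ a := by
          intro hba; subst hba; simp at h
        simp [Ne.symm hba]
      · by_cases hbx : b = x
        · subst hbx
          simp [Ne.symm hax] at h
        · have ha' : a ∈ t.filter p := by
            rcases List.mem_cons.mp ha with h'|h' <;> [exact absurd h' hax; exact h']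
          have hb' : b ∈ t.filter p := by
            rcases List.mem_cons.mp hb with h'|h' <;> [exact absurd h' hbx; exact h']
          have h' : List.idxOf a (t.filter p) < List.idxOf b (t.filter p) := by
            simp [Ne.symm hax, Ne.symm hbx] at h
            omega
          have := ih ha' hb' h'
          simp [Ne.symm hax, Ne.symm hbx]
          omega
    · rw [List.filter_cons_of_neg hp] at ha hb h
      have hax : a ≠ x := fun he => hp (he ▸ (List.mem_filter.mp ha).2)
      have hbx : b ≠ x := fun he => hp (he ▸ (List.mem_filter.mp hb).2)
      have := ih ha hb h
      simp [Ne.symm hax, Ne.symm hbx]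
      omega

-- A's accumulated list is the dedup of (filtered key ++ alphabet)
lemma pvListA (k : List Char) :
    (pvAlphabet.foldl (fun matrix char =>
        if !matrix.contains char then matrix ++ [char] else matrix)
      (k.foldl (fun matrix char =>
        if !matrix.contains char && pvAlphabet.contains char then matrix ++ [char] else matrix) []))
    = PySem.List.dedup (k.filter (fun c => pvAlphabet.contains c) ++ pvAlphabet) := by
  have h1 : ∀ (init : List Char),
      k.foldl (fun matrix char =>
        if !matrix.contains char && pvAlphabet.contains char then matrix ++ [char] else matrix) init
      = (k.filter (fun c => pvAlphabet.contains c)).foldl PySem.Set.add init := by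
    intro init
    rw [← PySem.List.foldl_if_eq_foldl_filter]
    apply PySem.List.foldl_congr_mem
    intro acc c _
    by_cases h : c ∈ acc <;> simp [PySem.Set.add, h]
  have h2 : ∀ (init : List Char),
      pvAlphabet.foldl (fun matrix char =>
        if !matrix.contains char then matrix ++ [char] else matrix) init
      = pvAlphabet.foldl PySem.Set.add init := by
    intro init
    apply PySem.List.foldl_congr_mem
    intro acc c _
    by_cases h : c ∈ acc <;> simp [PySem.Set.add, h]
  rw [h1, h2, PySem.List.dedup_eq_ofList, PySem.Set.ofList_eq_foldl, List.foldl_append]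

-- the rank key, written through idxOf, for letters of the alphabet
lemma pvRankEq (k : List Char) (c : Char) (hc : c ∈ pvAlphabet) :
    pvRank k c = if c ∈ k then ((List.idxOf c k : Nat) : Int)
                 else (k.length : Int) + (List.idxOf c pvAlphabet : Nat) := by
  simp only [pvRank, pvFindSingle, hc, if_true]
  by_cases hk : c ∈ k
  · simp [hk]
  · simp [hk]

-- B's sorted alphabet is that same list: rank is strictly increasing along it
lemma pvSortedEq (k : List Char) :
    PySem.List.sorted pvAlphabet (fun c => pvRank k c) false
    = PySem.List.dedup (k.filter (fun c => pvAlphabet.contains c) ++ pvAlphabet) := by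
  set p : Char → Bool := fun c => pvAlphabet.contains c with hp
  set L : List Char := k.filter p ++ pvAlphabet with hL
  have hmemL : ∀ a, a ∈ L ↔ a ∈ pvAlphabet := by
    intro a
    constructor
    · intro h
      rcases List.mem_append.mp h with h'|h'
      · have := (List.mem_filter.mp h').2
        simpa [hp] using this
      · exact h'
    · intro h; exact List.mem_append.mpr (Or.inr h)
  apply PySem.List.sorted_eq_of_perm_of_pairwise_lt
  · apply (List.perm_ext_iff_of_nodup (PySem.List.nodup_dedup L) (by decide)).mpr
    intro a
    rw [PySem.List.mem_dedup]
    exact hmemL a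
  · apply List.Pairwise.imp_of_mem ?_ (pvDedupPairwise L)
    intro a b ha hb hab
    rw [PySem.List.mem_dedup] at ha hb
    have haA : a ∈ pvAlphabet := (hmemL a).mp ha
    have hbA : b ∈ pvAlphabet := (hmemL b).mp hb
    have hpa : p a = true := by simpa [hp] using haA
    have hpb : p b = true := by simpa [hp] using hbA
    rw [pvRankEq k a haA, pvRankEq k b hbA]
    rw [hL, List.idxOf_append, List.idxOf_append] at hab
    by_cases hak : a ∈ k <;> by_cases hbk : b ∈ k
    · have haf : a ∈ k.filter p := List.mem_filter.mpr ⟨hak, hpa⟩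
      have hbf : b ∈ k.filter p := List.mem_filter.mpr ⟨hbk, hpb⟩
      rw [if_pos haf, if_pos hbf] at hab
      have := pvFilterIdxOfMono p k a b haf hbf hab
      simp [hak, hbk]
      omega
    · have hak' : List.idxOf a k < k.length := List.idxOf_lt_length_of_mem hak
      simp [hak, hbk]
      omega
    · -- a ∉ k, b ∈ k is impossible: b's first occurrence precedes the whole alphabet block
      have haf : a ∉ k.filter p := fun h => hak (List.mem_filter.mp h).1
      have hbf : b ∈ k.filter p := List.mem_filter.mpr ⟨hbk, hpb⟩
      rw [if_neg haf, if_pos hbf] at hab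
      have := List.idxOf_lt_length_of_mem hbf
      omega
    · have haf : a ∉ k.filter p := fun h => hak (List.mem_filter.mp h).1
      have hbf : b ∉ k.filter p := fun h => hbk (List.mem_filter.mp h).1
      rw [if_neg haf, if_neg hbf] at hab
      simp [hak, hbk]
      omega

lemma pvMatrixEq (k : List Char) : pvCreateMatrixA k = pvCreateMatrixB k := by
  simp only [pvCreateMatrixA, pvCreateMatrixB, pvListA, pvSortedEq]

lemma pvMidEq (n : Nat) : (if n % 2 = 1 then n / 2 + 1 else n / 2) = (n + 1) / 2 := by
  split <;> omega

-- ===== VERDICT (by name: the statement is the Claim_ definition above) =====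
theorem create_matrices_spec : Claim_equal_create_matrices := by
  intro key _
  unfold Spec_create_matrices create_matrices create_matrices_alt
  simp only [pvMidEq, pvMatrixEq]
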